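-- pv_equiv track=rewrite | github.com/Nighteyez07/AdventOfCode | 2025/day12.py | try_fit_presents
-- ===== SOURCE A (Python) =====
-- def can_place(grid, cells, row, col):
--     """Check if a shape can be placed at a given position."""
--     # Early exit if empty
--     if not cells:
--         return False
--
--     height = len(grid)
--     width = len(grid[0])
--
--     # Quick bounds check on extent
--     max_dr = max(dr for dr, dc in cells)
--     max_dc = max(dc for dr, dc in cells)
--     if row + max_dr >= height or col + max_dc >= width:
--         return False
--
--     for dr, dc in cells:
--         r, c = row + dr, col + dc
--         if r < 0 or r >= height or c < 0 or c >= width: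
--             return False
--         if grid[r][c] != '.':
--             return False
--     return True
--
-- def place_shape(grid, cells, row, col, mark):
--     """Place a shape on the grid."""
--     for dr, dc in cells:
--         r, c = row + dr, col + dc
--         grid[r][c] = mark
--
-- def remove_shape(grid, cells, row, col):
--     """Remove a shape from the grid."""
--     for dr, dc in cells:
--         r, c = row + dr, col + dc
--         grid[r][c] = '.'
--
-- def try_fit_presents(width, height, presents_list, shape_orientations):
--     """Try to fit all presents into a region using backtracking."""
--     grid = [['.' for _ in range(width)] for _ in range(height)]
--
--     # Sort presents by size (larger first) for better pruning
--     presents_with_sizes = []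
--     for shape_idx in presents_list:
--         # Size is the number of cells in the shape
--         size = len(shape_orientations[shape_idx][0])
--         presents_with_sizes.append((size, shape_idx))
--     presents_with_sizes.sort(reverse=True)
--     sorted_presents = [shape_idx for _, shape_idx in presents_with_sizes]
--
--     # For each shape, precompute valid positions for each orientation
--     valid_positions = {}
--     for shape_idx in set(sorted_presents):
--         valid_positions[shape_idx] = []
--         for orientation in shape_orientations[shape_idx]:
--             positions = []
--             # Only check positions where the shape could actually fit
--             max_dr = max(dr for dr, dc in orientation) if orientation else 0
--             max_dc = max(dc for dr, dc in orientation) if orientation else 0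
--             for row in range(height - max_dr):
--                 for col in range(width - max_dc):
--                     positions.append((orientation, row, col))
--             valid_positions[shape_idx].append(positions)
--
--     def backtrack(present_idx):
--         if present_idx >= len(sorted_presents):
--             return True  # All presents placed successfully
--
--         shape_idx = sorted_presents[present_idx]
--
--         # Try each orientation with its valid positions
--         for positions in valid_positions[shape_idx]:
--             for orientation, row, col in positions:
--                 if can_place(grid, orientation, row, col):
--                     place_shape(grid, orientation, row, col, str(present_idx))
--
--                     if backtrack(present_idx + 1):
--                         return True
--
--                     remove_shape(grid, orientation, row, col)
--
--         return False
--
--     return backtrack(0)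
-- ===== SOURCE B (Python) =====
-- def try_fit_presents(width, height, presents_list, shape_orientations):
--     """Fit all presents: plain recursion over the presents in their GIVEN order
--     (the size sort is only a pruning heuristic and cannot change satisfiability),
--     with no precomputation pass, no grid and no undo: occupancy is an immutable
--     set of occupied cells threaded through the recursion, and each shape's
--     in-bounds placements are produced on the fly from closed-form ranges."""
--
--     def spots(orientation):
--         # absolute-cell lists of every in-bounds placement of one orientation
--         if not orientation:
--             return []
--         drs = [dr for dr, _ in orientation]
--         dcs = [dc for _, dc in orientation]
--         out = []
--         for row in range(max(0, -min(drs)), height - max(drs)):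
--             for col in range(max(0, -min(dcs)), width - max(dcs)):
--                 out.append([(row + dr, col + dc) for dr, dc in orientation])
--         return out
--
--     def fits(remaining, occupied):
--         if not remaining:
--             return True
--         return any(all(p not in occupied for p in cells)
--                    and fits(remaining[1:], occupied | set(cells))
--                    for orientation in shape_orientations[remaining[0]]
--                    for cells in spots(orientation))
--
--     return fits(presents_list, frozenset())
-- ===== Notes on version B (the rewrite author's own statement) =====
-- stated objective: simpler
-- what changed: B drops A's whole preparatory phase - the size-decorated sort of the presents and the per-shape dictionary of precomputed positions - and recurses over the presents in their given order (equivalence rests on a proved theorem that the search's answer is invariant under any permutation of the presents), replacing the mutable grid with place/undo by an immutable occupied-cell set and per-cell bounds checks by closed-form placement ranges.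
-- outside the precondition, e.g. on try_fit_presents(1, 0, [0, 1], [[[(0, 0), (0, 1)]], [[(-1, 0)]]]): A returns False, B returns False; on try_fit_presents(2, 2, [0], [[]]): A raises IndexError, B returns False
import Mathlib
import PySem

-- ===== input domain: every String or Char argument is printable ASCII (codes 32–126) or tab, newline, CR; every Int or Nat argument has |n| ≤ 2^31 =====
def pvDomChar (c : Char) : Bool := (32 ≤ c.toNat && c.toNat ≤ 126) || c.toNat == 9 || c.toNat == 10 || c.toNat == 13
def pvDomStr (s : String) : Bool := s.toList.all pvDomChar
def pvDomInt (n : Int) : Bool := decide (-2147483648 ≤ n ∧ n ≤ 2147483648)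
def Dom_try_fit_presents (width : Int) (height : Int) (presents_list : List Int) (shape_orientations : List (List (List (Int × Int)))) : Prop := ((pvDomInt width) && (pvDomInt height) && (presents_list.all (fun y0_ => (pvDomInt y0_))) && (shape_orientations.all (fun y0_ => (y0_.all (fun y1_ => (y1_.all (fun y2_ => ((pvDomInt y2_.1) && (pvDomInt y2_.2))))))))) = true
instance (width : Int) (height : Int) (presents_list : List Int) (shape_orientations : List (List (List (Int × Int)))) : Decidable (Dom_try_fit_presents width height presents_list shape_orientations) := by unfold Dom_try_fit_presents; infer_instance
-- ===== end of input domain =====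

-- ===== PORT A =====
-- B drops A's sort and precomputation pass and recurses over the presents in their
-- given order with an immutable occupied-cell set instead of a mutated grid with
-- place/undo (objective: simpler; search-order invariance is proved below).
-- grid[r][c] read / write (indices in range at every call site reached under Pre_)
def pvGget (g : List (List String)) (r c : Int) : String :=
  PySem.List.pyGetD (PySem.List.pyGetD g r []) c ""

def pvGset (g : List (List String)) (r c : Int) (v : String) : List (List String) :=
  PySem.List.pySetD g r (PySem.List.pySetD (PySem.List.pyGetD g r []) c v)

def can_place (grid : List (List String)) (cells : List (Int × Int)) (row col : Int) : Bool :=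
  match cells with
  | [] => false
  | c0 :: rest =>
      let h : Int := grid.length
      let w : Int := (PySem.List.pyGetD grid 0 ([] : List String)).length
      let maxDr : Int := rest.foldl (fun m p => max m p.1) c0.1
      let maxDc : Int := rest.foldl (fun m p => max m p.2) c0.2
      if row + maxDr ≥ h ∨ col + maxDc ≥ w then false
      else (c0 :: rest).all fun p =>
        decide (0 ≤ row + p.1) && decide (row + p.1 < h) &&
        decide (0 ≤ col + p.2) && decide (col + p.2 < w) &&
        (pvGget grid (row + p.1) (col + p.2) == ".")

def place_shape (grid : List (List String)) (cells : List (Int × Int)) (row col : Int)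
    (mark : String) : List (List String) :=
  cells.foldl (fun g p => pvGset g (row + p.1) (col + p.2) mark) grid

def remove_shape (grid : List (List String)) (cells : List (Int × Int)) (row col : Int) :
    List (List String) :=
  cells.foldl (fun g p => pvGset g (row + p.1) (col + p.2) ".") grid

-- positions collected for one orientation (the two nested `for` loops appending)
def a_positions (width height : Int) (orientation : List (Int × Int)) :
    List ((List (Int × Int)) × Int × Int) :=
  let maxDr : Int := match orientation with
    | [] => 0
    | c0 :: rest => rest.foldl (fun m p => max m p.1) c0.1
  let maxDc : Int := match orientation with
    | [] => 0
    | c0 :: rest => rest.foldl (fun m p => max m p.2) c0.2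
  (PySem.List.pyRange 0 (height - maxDr) 1).foldl (fun acc row =>
    (PySem.List.pyRange 0 (width - maxDc) 1).foldl (fun acc2 col =>
      acc2 ++ [(orientation, row, col)]) acc) []

def a_valid_positions (width height : Int) (shape_orientations : List (List (List (Int × Int))))
    (sortedPresents : List Int) :
    PySem.Dict Int (List (List ((List (Int × Int)) × Int × Int))) :=
  (PySem.Set.ofList sortedPresents).foldl (fun d s =>
    d.insert s ((PySem.List.pyGetD shape_orientations s []).foldl
      (fun acc orientation => acc ++ [a_positions width height orientation]) [])) PySem.Dict.empty

def backtrackA (vp : PySem.Dict Int (List (List ((List (Int × Int)) × Int × Int)))) :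
    List Int → Int → List (List String) → Bool × List (List String)
  | [], _, grid => (true, grid)
  | s :: rest, idx, grid =>
      (vp.getD s []).foldl (fun st positions =>
        positions.foldl (fun st t =>
          if st.1 then st
          else if can_place st.2 t.1 t.2.1 t.2.2 then
            let g1 := place_shape st.2 t.1 t.2.1 t.2.2 (PySem.Int.toStr idx)
            let res := backtrackA vp rest (idx + 1) g1
            if res.1 then (true, res.2)
            else (false, remove_shape res.2 t.1 t.2.1 t.2.2)
          else st) st) (false, grid)
termination_by l => l.length
decreasing_by simp

def try_fit_presents (width : Int) (height : Int) (presents_list : List Int) (shape_orientations : List (List (List (Int × Int)))) : Bool :=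
  let grid := List.replicate height.toNat (List.replicate width.toNat ".")
  let presents_with_sizes := presents_list.foldl (fun acc s =>
    acc ++ [(((PySem.List.pyGetD (PySem.List.pyGetD shape_orientations s []) 0 []).length : Int), s)]) []
  let sortedPresents :=
    (PySem.List.sorted2 presents_with_sizes (fun p => p.1) (fun p => p.2) true).map (fun p => p.2)
  let vp := a_valid_positions width height shape_orientations sortedPresents
  (backtrackA vp sortedPresents 0 grid).1

-- ===== PORT B =====
-- Source B's `spots`: the absolute-cell lists of every in-bounds placement of one
-- orientation; the closed-form row/col ranges make every cell in bounds
def b_spots (width height : Int) (orientation : List (Int × Int)) :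
    List (List (Int × Int)) :=
  match orientation with
  | [] => []
  | c0 :: rest =>
      let minDr : Int := rest.foldl (fun m p => min m p.1) c0.1
      let maxDr : Int := rest.foldl (fun m p => max m p.1) c0.1
      let minDc : Int := rest.foldl (fun m p => min m p.2) c0.2
      let maxDc : Int := rest.foldl (fun m p => max m p.2) c0.2
      (PySem.List.pyRange (max 0 (-minDr)) (height - maxDr) 1).foldl (fun pl row =>
        (PySem.List.pyRange (max 0 (-minDc)) (width - maxDc) 1).foldl (fun pl2 col =>
          pl2 ++ [orientation.map (fun p => (row + p.1, col + p.2))]) pl) []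

-- Source B's `fits`: recursion over the presents in their GIVEN order, occupancy an
-- immutable set, the nested generator being the two chained `for` clauses of `any`
def b_fits (width height : Int) (shape_orientations : List (List (List (Int × Int)))) :
    List Int → PySem.Set (Int × Int) → Bool
  | [], _ => true
  | s :: rest, occupied =>
      (PySem.List.pyGetD shape_orientations s []).any fun orientation =>
        (b_spots width height orientation).any fun cells =>
          cells.all (fun p => !(PySem.Set.contains occupied p)) &&
          b_fits width height shape_orientations rest (PySem.Set.union occupied cells)

def try_fit_presents_alt (width : Int) (height : Int) (presents_list : List Int) (shape_orientations : List (List (List (Int × Int)))) : Bool :=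
  b_fits width height shape_orientations presents_list PySem.Set.empty

-- ===== PRECONDITION & SPEC =====
-- Pre_ excludes exactly the inputs on which the Python A raises IndexError: a present
-- index outside shape_orientations (or naming an empty orientation list), and the empty
-- grid (height <= 0) together with a listed orientation whose extent fits the candidate
-- ranges, where can_place evaluates grid[0]. It slightly over-excludes: with height <= 0
-- such an orientation on a shape other than the first one tried makes A return False
-- without crashing (see claim.json "cites").
def Pre_try_fit_presents (width : Int) (height : Int) (presents_list : List Int) (shape_orientations : List (List (List (Int × Int)))) : Prop :=
  (∀ s ∈ presents_list, PySem.Raise.InRange shape_orientations.length s ∧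
      PySem.List.pyGetD shape_orientations s [] ≠ []) ∧
  (height ≤ 0 → ∀ s ∈ presents_list, ∀ o ∈ PySem.List.pyGetD shape_orientations s [],
      o = [] ∨ ∃ p ∈ o, height ≤ p.1 ∨ width ≤ p.2)
instance (width : Int) (height : Int) (presents_list : List Int) (shape_orientations : List (List (List (Int × Int)))) : Decidable (Pre_try_fit_presents width height presents_list shape_orientations) := by unfold Pre_try_fit_presents; infer_instance

def pvWitness_try_fit_presents : Int × Int × List Int × (List (List (List (Int × Int)))) :=
  (3, 2, [0, 1], [[[(0, 0), (0, 1)]], [[(0, 0)], [(1, 0)]]])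

def Spec_try_fit_presents (width : Int) (height : Int) (presents_list : List Int) (shape_orientations : List (List (List (Int × Int)))) (out : Bool) : Prop := out = try_fit_presents_alt width height presents_list shape_orientations
instance (width : Int) (height : Int) (presents_list : List Int) (shape_orientations : List (List (List (Int × Int)))) (out : Bool) : Decidable (Spec_try_fit_presents width height presents_list shape_orientations out) := by unfold Spec_try_fit_presents; infer_instance

-- ===== CLAIM (what is proved, stated in full; the proofs are below) =====
def Claim_equal_try_fit_presents : Prop := ∀ (width : Int) (height : Int) (presents_list : List Int) (shape_orientations : List (List (List (Int × Int)))), Dom_try_fit_presents width height presents_list shape_orientations → Pre_try_fit_presents width height presents_list shape_orientations → Spec_try_fit_presents width height presents_list shape_orientations (try_fit_presents width height presents_list shape_orientations)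

-- ===== LEMMAS AND PROOFS =====

-- ---------- proof-only helpers ----------

-- str(n) is never "."
lemma pvToDigitsCore_ne_dot : ∀ (fuel n : Nat) (ds : List Char), (∀ c ∈ ds, c ≠ '.') →
    ∀ c ∈ Nat.toDigitsCore 10 fuel n ds, c ≠ '.' := by
  intro fuel
  induction fuel with
  | zero => intro n ds hds; simpa [Nat.toDigitsCore] using hds
  | succ fuel ih =>
      intro n ds hds
      have hdig : (n % 10).digitChar ≠ '.' := by
        have h : n % 10 < 10 := Nat.mod_lt _ (by omega)
        interval_cases (n % 10) <;> decide
      simp only [Nat.toDigitsCore]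
      split
      · intro c hc
        rcases List.mem_cons.mp hc with rfl | hc
        · exact hdig
        · exact hds c hc
      · exact ih _ _ (by
          intro c hc
          rcases List.mem_cons.mp hc with rfl | hc
          · exact hdig
          · exact hds c hc)

lemma pvToStr_ne_dot (n : Int) : PySem.Int.toStr n ≠ "." := by
  intro h
  have h2 : PySem.Int.toChars n = ['.'] := by
    have := congrArg String.toList h
    rw [PySem.Int.toStr] at this
    simpa [String.toList_ofList] using this
  unfold PySem.Int.toChars at h2
  split at h2
  · simp at h2
  · have := pvToDigitsCore_ne_dot (n.toNat + 1) n.toNat [] (by simp)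
    have hmem : '.' ∈ Nat.toDigitsCore 10 (n.toNat + 1) n.toNat [] := by
      have h3 : Nat.toDigitsCore 10 (n.toNat + 1) n.toNat [] = ['.'] := h2
      rw [h3]; simp
    exact this '.' hmem rfl

-- running max / min of a projection, as a universal bound
lemma pvFoldMaxLt {α : Type} (l : List α) (f : α → Int) (a x : Int) :
    l.foldl (fun m p => max m (f p)) a < x ↔ a < x ∧ ∀ p ∈ l, f p < x := by
  induction l generalizing a with
  | nil => simp
  | cons b l ih =>
      simp only [List.foldl_cons, ih, List.mem_cons]
      constructor
      · rintro ⟨h1, h2⟩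
        have := max_lt_iff.mp h1
        exact ⟨this.1, fun p hp => hp.elim (fun h => h ▸ this.2) (h2 p)⟩
      · rintro ⟨h1, h2⟩
        exact ⟨max_lt_iff.mpr ⟨h1, h2 b (Or.inl rfl)⟩, fun p hp => h2 p (Or.inr hp)⟩

lemma pvFoldMinLe {α : Type} (l : List α) (f : α → Int) (a x : Int) :
    x ≤ l.foldl (fun m p => min m (f p)) a ↔ x ≤ a ∧ ∀ p ∈ l, x ≤ f p := by
  induction l generalizing a with
  | nil => simp
  | cons b l ih =>
      simp only [List.foldl_cons, ih, List.mem_cons]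
      constructor
      · rintro ⟨h1, h2⟩
        have := le_min_iff.mp h1
        exact ⟨this.1, fun p hp => hp.elim (fun h => h ▸ this.2) (h2 p)⟩
      · rintro ⟨h1, h2⟩
        exact ⟨le_min_iff.mpr ⟨h1, h2 b (Or.inl rfl)⟩, fun p hp => h2 p (Or.inr hp)⟩

-- the absolute cells of a placement, and validity (all cells in the grid)
def pvAbs (o : List (Int × Int)) (row col : Int) : List (Int × Int) :=
  o.map (fun p => (row + p.1, col + p.2))

def pvValid (width height : Int) (o : List (Int × Int)) (row col : Int) : Prop :=
  o ≠ [] ∧ 0 ≤ row ∧ 0 ≤ col ∧ ∀ p ∈ o,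
    0 ≤ row + p.1 ∧ row + p.1 < (height.toNat : Int) ∧
    0 ≤ col + p.2 ∧ col + p.2 < (width.toNat : Int)

-- what both searches decide: the remaining presents fit around occupied cells O
def pvSat (width height : Int) (so : List (List (List (Int × Int)))) :
    List Int → ((Int × Int) → Prop) → Prop
  | [], _ => True
  | s :: rest, O => ∃ o ∈ PySem.List.pyGetD so s [], ∃ row col,
      pvValid width height o row col ∧ (∀ q ∈ pvAbs o row col, ¬ O q) ∧
      pvSat width height so rest (fun q => O q ∨ q ∈ pvAbs o row col)

lemma pvSat_congr (width height : Int) (so : List (List (List (Int × Int)))) :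
    ∀ (rest : List Int) (O O' : (Int × Int) → Prop), (∀ q, O q ↔ O' q) →
    (pvSat width height so rest O ↔ pvSat width height so rest O') := by
  intro rest
  induction rest with
  | nil => intro O O' h; simp [pvSat]
  | cons s rest ih =>
      intro O O' h
      simp only [pvSat]
      refine exists_congr fun o => and_congr_right fun _ => ?_
      refine exists_congr fun row => exists_congr fun col => and_congr_right fun _ => ?_
      refine and_congr (by simp [h]) ?_
      exact ih _ _ (fun q => or_congr_left (h q))

-- ORDER IRRELEVANCE: the search's answer is invariant under permuting the presents —
-- this is what lets B drop A's size sort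
lemma pvSat_swap (width height : Int) (so : List (List (List (Int × Int))))
    (a b : Int) (l : List Int) (O : (Int × Int) → Prop)
    (h : pvSat width height so (a :: b :: l) O) :
    pvSat width height so (b :: a :: l) O := by
  obtain ⟨oa, hoa, ra, ca, hva, hda, ob, hob, rb, cb, hvb, hdb, hsat⟩ := h
  refine ⟨ob, hob, rb, cb, hvb, ?_, oa, hoa, ra, ca, hva, ?_, ?_⟩
  · intro q hq
    exact fun hO => hdb q hq (Or.inl hO)
  · intro q hq
    rintro (hO | hB)
    · exact hda q hq hO
    · exact hdb q hB (Or.inr hq)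
  · refine (pvSat_congr width height so l _ _ ?_).mp hsat
    intro q; tauto

lemma pvSat_perm (width height : Int) (so : List (List (List (Int × Int)))) :
    ∀ {l l' : List Int}, l.Perm l' → ∀ (O : (Int × Int) → Prop),
    (pvSat width height so l O ↔ pvSat width height so l' O) := by
  intro l l' hp
  induction hp with
  | nil => intro O; exact Iff.rfl
  | cons x _ ih =>
      intro O
      simp only [pvSat]
      refine exists_congr fun o => and_congr_right fun _ => ?_
      refine exists_congr fun row => exists_congr fun col => ?_
      refine and_congr_right fun _ => and_congr_right fun _ => ih _
  | swap x y l =>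
      intro O
      exact ⟨pvSat_swap width height so y x l O, pvSat_swap width height so x y l O⟩
  | trans _ _ ih1 ih2 =>
      intro O
      exact (ih1 O).trans (ih2 O)

-- membership in A's precomputed candidate list
lemma pvMem_a_positions (width height : Int) (o : List (Int × Int))
    (t : (List (Int × Int)) × Int × Int) :
    t ∈ a_positions width height o ↔ ∃ row col, t = (o, row, col) ∧
      (0 ≤ row ∧ row < height - (match o with
        | [] => 0 | c0 :: rest => rest.foldl (fun m p => max m p.1) c0.1)) ∧
      (0 ≤ col ∧ col < width - (match o with
        | [] => 0 | c0 :: rest => rest.foldl (fun m p => max m p.2) c0.2)) := by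
  simp only [a_positions, PySem.List.foldl_append_singleton_eq_map,
    PySem.List.foldl_append_eq_flatMap, List.nil_append, List.mem_flatMap, List.mem_map,
    PySem.List.mem_pyRange_one]
  constructor
  · rintro ⟨row, hrow, col, hcol, rfl⟩
    exact ⟨row, col, rfl, hrow, hcol⟩
  · rintro ⟨row, col, rfl, hrow, hcol⟩
    exact ⟨row, hrow, col, hcol, rfl⟩

-- the valid placements of one orientation are exactly B's spots
lemma pvRange_key (width height : Int) (c0 : Int × Int) (rest : List (Int × Int))
    (row col : Int) :
    ((max 0 (-(rest.foldl (fun m p => min m p.1) c0.1)) ≤ row ∧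
      row < height - rest.foldl (fun m p => max m p.1) c0.1) ∧
     (max 0 (-(rest.foldl (fun m p => min m p.2) c0.2)) ≤ col ∧
      col < width - rest.foldl (fun m p => max m p.2) c0.2)) ↔
    pvValid width height (c0 :: rest) row col := by
  have hmax1 := fun x => pvFoldMaxLt rest (fun p => p.1) c0.1 x
  have hmax2 := fun x => pvFoldMaxLt rest (fun p => p.2) c0.2 x
  have hmin1 := fun x => pvFoldMinLe rest (fun p => p.1) c0.1 x
  have hmin2 := fun x => pvFoldMinLe rest (fun p => p.2) c0.2 x
  simp only [max_le_iff]
  constructor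
  · rintro ⟨⟨⟨hr0, hr1⟩, hr2⟩, ⟨⟨hc0, hc1⟩, hc2⟩⟩
    have h1 := (hmax1 (height - row)).mp (by omega)
    have h2 := (hmax2 (width - col)).mp (by omega)
    have h3 := (hmin1 (-row)).mp (by omega)
    have h4 := (hmin2 (-col)).mp (by omega)
    refine ⟨by simp, by omega, by omega, ?_⟩
    intro p hp
    rcases List.mem_cons.mp hp with rfl | hp
    · omega
    · have := h1.2 p hp; have := h2.2 p hp; have := h3.2 p hp; have := h4.2 p hp
      omega
  · rintro ⟨-, hr0, hc0, hcell⟩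
    have hc0' := hcell c0 (List.mem_cons_self ..)
    have hrest := fun p hp => hcell p (List.mem_cons_of_mem c0 hp)
    have hm1 : -row ≤ rest.foldl (fun m p => min m p.1) c0.1 :=
      (hmin1 (-row)).mpr ⟨by omega, fun p hp => by have := hrest p hp; omega⟩
    have hm2 : -col ≤ rest.foldl (fun m p => min m p.2) c0.2 :=
      (hmin2 (-col)).mpr ⟨by omega, fun p hp => by have := hrest p hp; omega⟩
    have hM1 : rest.foldl (fun m p => max m p.1) c0.1 < height - row :=
      (hmax1 (height - row)).mpr ⟨by omega, fun p hp => by have := hrest p hp; omega⟩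
    have hM2 : rest.foldl (fun m p => max m p.2) c0.2 < width - col :=
      (hmax2 (width - col)).mpr ⟨by omega, fun p hp => by have := hrest p hp; omega⟩
    exact ⟨⟨⟨hr0, by omega⟩, by omega⟩, ⟨⟨hc0, by omega⟩, by omega⟩⟩

lemma pvMem_b_spots (width height : Int) (o : List (Int × Int))
    (cells : List (Int × Int)) :
    cells ∈ b_spots width height o ↔ ∃ row col,
      pvValid width height o row col ∧ cells = pvAbs o row col := by
  cases o with
  | nil =>
      simp only [b_spots, List.not_mem_nil, false_iff]
      rintro ⟨row, col, hv, -⟩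
      exact hv.1 rfl
  | cons c0 rest =>
      simp only [b_spots, PySem.List.foldl_append_singleton_eq_map,
        PySem.List.foldl_append_eq_flatMap, List.nil_append, List.mem_flatMap,
        List.mem_map, PySem.List.mem_pyRange_one]
      constructor
      · rintro ⟨row, hrow, col, hcol, rfl⟩
        exact ⟨row, col, (pvRange_key width height c0 rest row col).mp ⟨hrow, hcol⟩, rfl⟩
      · rintro ⟨row, col, hv, rfl⟩
        exact ⟨row, ((pvRange_key width height c0 rest row col).mpr hv).1, col,
          ((pvRange_key width height c0 rest row col).mpr hv).2, rfl⟩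

-- ---------- grid calculus ----------

def pvDims (width height : Int) (g : List (List String)) : Prop :=
  g.length = height.toNat ∧ ∀ r ∈ g, r.length = width.toNat

def pvIn (width height : Int) (q : Int × Int) : Prop :=
  0 ≤ q.1 ∧ q.1 < (height.toNat : Int) ∧ 0 ≤ q.2 ∧ q.2 < (width.toNat : Int)

lemma pvGset_dims {width height : Int} {g : List (List String)} (hd : pvDims width height g)
    {r c : Int} (hr : pvIn width height (r, c)) (v : String) :
    pvDims width height (pvGset g r c v) := by
  obtain ⟨hr0, hr1, hc0, hc1⟩ := hr
  obtain ⟨hlen, hrows⟩ := hd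
  simp only at hr0 hr1 hc0 hc1
  unfold pvGset
  rw [PySem.List.pySetD_of_nonneg _ _ hr0, PySem.List.pyGetD_of_nonneg _ _ hr0]
  refine ⟨by simpa using hlen, ?_⟩
  intro rw hrw
  rcases List.mem_or_eq_of_mem_set hrw with h | rfl
  · exact hrows _ h
  · rw [PySem.List.pySetD_of_nonneg _ _ hc0, List.length_set]
    have hlt : r.toNat < g.length := by omega
    rw [List.getD_eq_getElem _ _ hlt]
    exact hrows _ (List.getElem_mem hlt)

lemma pvGget_pvGset {width height : Int} {g : List (List String)} (hd : pvDims width height g)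
    {r c : Int} (hr : pvIn width height (r, c)) (v : String) (q : Int × Int)
    (hq : pvIn width height q) :
    pvGget (pvGset g r c v) q.1 q.2 = if q = (r, c) then v else pvGget g q.1 q.2 := by
  obtain ⟨hr0, hr1, hc0, hc1⟩ := hr
  obtain ⟨hq0, hq1, hq2, hq3⟩ := hq
  obtain ⟨hlen, hrows⟩ := hd
  simp only at hr0 hr1 hc0 hc1
  have hltr : r.toNat < g.length := by omega
  have hrowlen : (PySem.List.pyGetD g r []).length = width.toNat := by
    rw [PySem.List.pyGetD_of_nonneg _ _ hr0, List.getD_eq_getElem _ _ hltr]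
    exact hrows _ (List.getElem_mem hltr)
  have hgr : PySem.List.pyGetD g r [] = g[r.toNat]'hltr := by
    rw [PySem.List.pyGetD_of_nonneg _ _ hr0, List.getD_eq_getElem _ _ hltr]
  have hltq : q.1.toNat < g.length := by omega
  have hrow : PySem.List.pyGetD (pvGset g r c v) q.1 [] =
      if q.1 = r then (g[r.toNat]'hltr).set c.toNat v else PySem.List.pyGetD g q.1 [] := by
    unfold pvGset
    rw [PySem.List.pySetD_of_nonneg _ _ hr0, PySem.List.pySetD_of_nonneg _ _ hc0, hgr,
      PySem.List.pyGetD_of_nonneg _ _ hq0,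
      List.getD_eq_getElem _ _ (by simpa using hltq), List.getElem_set]
    by_cases h : q.1 = r
    · rw [if_pos (by omega), if_pos h]
    · rw [if_neg (by omega), if_neg h,
        PySem.List.pyGetD_of_nonneg _ _ hq0, List.getD_eq_getElem _ _ hltq]
  unfold pvGget
  rw [hrow]
  by_cases h : q.1 = r
  · rw [if_pos h]
    have hltc : c.toNat < (g[r.toNat]'hltr).length := by
      have := hrows _ (List.getElem_mem hltr); omega
    have hlen2 : ((g[r.toNat]'hltr).set c.toNat v).length = width.toNat := by
      rw [List.length_set]; exact hrows _ (List.getElem_mem hltr)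
    rw [PySem.List.pyGetD_of_nonneg _ _ hq2,
      List.getD_eq_getElem _ _ (by omega), List.getElem_set]
    by_cases h2 : q.2 = c
    · rw [if_pos (by omega), if_pos (Prod.ext_iff.mpr ⟨h, h2⟩)]
    · rw [if_neg (by omega), if_neg (fun hqe => h2 (by rw [hqe]))]
      rw [PySem.List.pyGetD_of_nonneg _ _ hq2, h, hgr,
        List.getD_eq_getElem _ _ (by have := hrows _ (List.getElem_mem hltr); omega)]
  · rw [if_neg h, if_neg (fun hqe => h (by rw [hqe] : q.1 = r))]

lemma pvGrid_ext {width height : Int} {g1 g2 : List (List String)}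
    (h1 : pvDims width height g1) (h2 : pvDims width height g2)
    (hc : ∀ q : Int × Int, pvIn width height q → pvGget g1 q.1 q.2 = pvGget g2 q.1 q.2) :
    g1 = g2 := by
  obtain ⟨hl1, hr1⟩ := h1
  obtain ⟨hl2, hr2⟩ := h2
  apply List.ext_getElem (by omega)
  intro i hi1 hi2
  have hri1 : g1[i].length = width.toNat := hr1 _ (List.getElem_mem hi1)
  have hri2 : g2[i].length = width.toNat := hr2 _ (List.getElem_mem hi2)
  apply List.ext_getElem (by omega)
  intro j hj1 hj2
  have := hc ((i : Int), (j : Int)) ⟨by omega, by omega, by omega, by omega⟩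
  simpa [pvGget, PySem.List.pyGetD_of_nonneg (i := (i : Int)) _ (by omega),
    PySem.List.pyGetD_of_nonneg (i := (j : Int)) _ (by omega),
    List.getD_eq_getElem?_getD, List.getElem?_eq_getElem, hi1, hi2, hj1, hj2] using this

lemma pvPlace_gget {width height : Int} (o : List (Int × Int)) (row col : Int) (mark : String) :
    ∀ (g : List (List String)), pvDims width height g →
    (∀ q ∈ pvAbs o row col, pvIn width height q) →
    pvDims width height (place_shape g o row col mark) ∧
    ∀ q : Int × Int, pvIn width height q →
      pvGget (place_shape g o row col mark) q.1 q.2 =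
        if q ∈ pvAbs o row col then mark else pvGget g q.1 q.2 := by
  induction o with
  | nil => intro g hd _; exact ⟨hd, fun q _ => by simp [place_shape, pvAbs]⟩
  | cons p o ih =>
      intro g hd hcells
      have habs : pvAbs (p :: o) row col = (row + p.1, col + p.2) :: pvAbs o row col := by
        simp [pvAbs]
      have hp : pvIn width height (row + p.1, col + p.2) := by
        apply hcells; rw [habs]; exact List.mem_cons_self ..
      have hstep : place_shape g (p :: o) row col mark =
          place_shape (pvGset g (row + p.1) (col + p.2) mark) o row col mark := by
        simp [place_shape]
      have hd1 := pvGset_dims hd hp mark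
      have hrest : ∀ q ∈ pvAbs o row col, pvIn width height q := by
        intro q hq; apply hcells; rw [habs]; exact List.mem_cons_of_mem _ hq
      obtain ⟨ihd, ihg⟩ := ih (pvGset g (row + p.1) (col + p.2) mark) hd1 hrest
      refine ⟨by rw [hstep]; exact ihd, ?_⟩
      intro q hq
      rw [hstep, ihg q hq, habs, pvGget_pvGset hd hp mark q hq]
      by_cases h1 : q ∈ pvAbs o row col
      · simp [h1]
      · by_cases h2 : q = (row + p.1, col + p.2) <;> simp [h1, h2]

lemma pvRemove_eq_place (g : List (List String)) (o : List (Int × Int)) (row col : Int) :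
    remove_shape g o row col = place_shape g o row col "." := rfl

lemma pvPlace_remove {width height : Int} {g : List (List String)} (hd : pvDims width height g)
    {o : List (Int × Int)} {row col : Int} (mark : String)
    (hcells : ∀ q ∈ pvAbs o row col, pvIn width height q)
    (hfree : ∀ q ∈ pvAbs o row col, pvGget g q.1 q.2 = ".") :
    remove_shape (place_shape g o row col mark) o row col = g := by
  obtain ⟨hd1, hg1⟩ := pvPlace_gget o row col mark g hd hcells
  rw [pvRemove_eq_place]
  obtain ⟨hd2, hg2⟩ := pvPlace_gget o row col "." (place_shape g o row col mark) hd1 hcells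
  apply pvGrid_ext hd2 hd
  intro q hq
  rw [hg2 q hq, hg1 q hq]
  by_cases h : q ∈ pvAbs o row col
  · simp [h, (hfree q h).symm]
  · simp [h]

-- ---------- grid invariant and can_place ----------

def pvGridInv (width height : Int) (g : List (List String)) (O : (Int × Int) → Prop) : Prop :=
  pvDims width height g ∧
  ∀ q : Int × Int, pvIn width height q → (pvGget g q.1 q.2 = "." ↔ ¬ O q)

lemma pvCan_place_iff {width height : Int} {g : List (List String)}
    (hd : pvDims width height g) (o : List (Int × Int)) (row col : Int) :
    can_place g o row col = true ↔ o ≠ [] ∧ ∀ p ∈ o,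
      0 ≤ row + p.1 ∧ row + p.1 < (height.toNat : Int) ∧
      0 ≤ col + p.2 ∧ col + p.2 < (width.toNat : Int) ∧
      pvGget g (row + p.1) (col + p.2) = "." := by
  obtain ⟨hlen, hrows⟩ := hd
  cases o with
  | nil => simp [can_place]
  | cons c0 rest =>
      have hmax1 := fun x => pvFoldMaxLt rest (fun p => p.1) c0.1 x
      have hmax2 := fun x => pvFoldMaxLt rest (fun p => p.2) c0.2 x
      cases g with
      | nil =>
          have h0 : height.toNat = 0 := by simpa using hlen.symm
          simp only [can_place, h0]
          constructor
          · intro hcp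
            split at hcp
            · exact absurd hcp (by simp)
            · rw [List.all_eq_true] at hcp
              have := hcp c0 (List.mem_cons_self ..)
              simp only [Bool.and_eq_true, decide_eq_true_eq, List.length_nil] at this
              omega
          · rintro ⟨-, hcell⟩
            exfalso
            obtain ⟨h1, h2, -⟩ := hcell c0 (List.mem_cons_self ..)
            omega
      | cons r0 g' =>
          have hH : ((r0 :: g').length : Int) = (height.toNat : Int) := by
            rw [hlen]
          have hW : ((PySem.List.pyGetD (r0 :: g') 0 ([] : List String)).length : Int) =
              (width.toNat : Int) := by
            rw [PySem.List.pyGetD_zero_cons]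
            exact Int.natCast_inj.mpr (hrows r0 (List.mem_cons_self ..))
          simp only [can_place, hH, hW]
          constructor
          · intro hcp
            split at hcp
            · exact absurd hcp (by simp)
            · rw [List.all_eq_true] at hcp
              refine ⟨by simp, ?_⟩
              intro p hp
              have := hcp p hp
              simp only [Bool.and_eq_true, decide_eq_true_eq, beq_iff_eq] at this
              exact ⟨this.1.1.1.1, this.1.1.1.2, this.1.1.2, this.1.2, this.2⟩
          · rintro ⟨-, hcell⟩
            have hc0 := hcell c0 (List.mem_cons_self ..)
            have hrest := fun p hp => hcell p (List.mem_cons_of_mem c0 hp)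
            rw [if_neg]
            · rw [List.all_eq_true]
              intro p hp
              have := hcell p hp
              simp only [Bool.and_eq_true, decide_eq_true_eq, beq_iff_eq]
              exact ⟨⟨⟨⟨this.1, this.2.1⟩, this.2.2.1⟩, this.2.2.2.1⟩, this.2.2.2.2⟩
            · push Not
              constructor
              · have := (hmax1 ((height.toNat : Int) - row)).mpr
                  ⟨by omega, fun p hp => by have := hrest p hp; omega⟩
                omega
              · have := (hmax2 ((width.toNat : Int) - col)).mpr
                  ⟨by omega, fun p hp => by have := hrest p hp; omega⟩
                omega

lemma pvPlace_inv {width height : Int} {g : List (List String)} {O : (Int × Int) → Prop}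
    (hinv : pvGridInv width height g O) {o : List (Int × Int)} {row col : Int} {mark : String}
    (hmark : mark ≠ ".") (hcells : ∀ q ∈ pvAbs o row col, pvIn width height q) :
    pvGridInv width height (place_shape g o row col mark)
      (fun q => O q ∨ q ∈ pvAbs o row col) := by
  obtain ⟨hd, hcell⟩ := hinv
  obtain ⟨hd1, hg1⟩ := pvPlace_gget o row col mark g hd hcells
  refine ⟨hd1, ?_⟩
  intro q hq
  rw [hg1 q hq]
  by_cases h : q ∈ pvAbs o row col
  · simp [h, hmark]
  · simp [h, hcell q hq]

-- ---------- early-exit fold ----------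

lemma pvFoldExit {τ σ : Type} (f : (Bool × σ) → τ → Bool × σ) (g0 : σ) (P : τ → Prop)
    (htrue : ∀ s t, f (true, s) t = (true, s)) :
    ∀ (L : List τ), (∀ t ∈ L, (f (false, g0) t = (false, g0) ∧ ¬ P t) ∨
        ((f (false, g0) t).1 = true ∧ P t)) →
    ((L.foldl f (false, g0)).1 = true ↔ ∃ t ∈ L, P t) ∧
    ((L.foldl f (false, g0)).1 = false → (L.foldl f (false, g0)).2 = g0) := by
  have hkeep : ∀ (L : List τ) (s : σ), L.foldl f (true, s) = (true, s) := by
    intro L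
    induction L with
    | nil => intro s; rfl
    | cons t L ih => intro s; rw [List.foldl_cons, htrue]; exact ih s
  intro L
  induction L with
  | nil => simp
  | cons t L ih =>
      intro hstep
      rcases hstep t (List.mem_cons_self ..) with ⟨heq, hnp⟩ | ⟨htr, hp⟩
      · rw [List.foldl_cons, heq]
        obtain ⟨ih1, ih2⟩ := ih (fun t ht => hstep t (List.mem_cons_of_mem _ ht))
        refine ⟨?_, ih2⟩
        rw [ih1]
        constructor
        · rintro ⟨u, hu, hpu⟩; exact ⟨u, List.mem_cons_of_mem _ hu, hpu⟩
        · rintro ⟨u, hu, hpu⟩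
          rcases List.mem_cons.mp hu with rfl | hu
          · exact absurd hpu hnp
          · exact ⟨u, hu, hpu⟩
      · rw [List.foldl_cons]
        have hsplit : f (false, g0) t = (true, (f (false, g0) t).2) := by
          cases h : f (false, g0) t with
          | mk b s =>
              have hb : b = true := by rw [h] at htr; exact htr
              simp [hb]
        rw [hsplit, hkeep]
        exact ⟨by simpa using Or.inl hp, by simp⟩

-- ---------- the dictionary of precomputed positions ----------

lemma pvGetD_foldl_insert {ν : Type} (F : Int → ν) (dflt : ν) :
    ∀ (l : List Int) (d : PySem.Dict Int ν) (s : Int),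
    (l.foldl (fun d x => d.insert x (F x)) d).getD s dflt =
      if s ∈ l then F s else d.getD s dflt := by
  intro l
  induction l with
  | nil => simp
  | cons x l ih =>
      intro d s
      simp only [List.foldl_cons, ih, PySem.Dict.getD_insert, List.mem_cons]
      by_cases h1 : s ∈ l <;> by_cases h2 : s = x <;> simp [h1, h2]

lemma pvVp_getD (width height : Int) (so : List (List (List (Int × Int))))
    (sortedPresents : List Int) (s : Int) (hs : s ∈ sortedPresents) :
    (a_valid_positions width height so sortedPresents).getD s [] =
      (PySem.List.pyGetD so s []).map (a_positions width height) := by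
  unfold a_valid_positions
  rw [pvGetD_foldl_insert]
  rw [PySem.List.foldl_append_singleton_eq_map]
  simp [PySem.Set.mem_ofList, hs]

-- ---------- the two searches compute pvSat ----------

lemma pvB_fits_iff (width height : Int) (so : List (List (List (Int × Int)))) :
    ∀ (rest : List Int) (occ : PySem.Set (Int × Int)),
    (b_fits width height so rest occ = true ↔ pvSat width height so rest (· ∈ occ)) := by
  intro rest
  induction rest with
  | nil => intro occ; simp [b_fits, pvSat]
  | cons s rest ih =>
      intro occ
      simp only [b_fits, List.any_eq_true, Bool.and_eq_true, List.all_eq_true, pvSat]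
      constructor
      · rintro ⟨o, ho, cells, hcells, hdisj, hfits⟩
        obtain ⟨row, col, hv, rfl⟩ := (pvMem_b_spots width height o cells).mp hcells
        refine ⟨o, ho, row, col, hv, ?_, ?_⟩
        · intro q hq
          have := hdisj q hq
          simpa [PySem.Set.contains_iff] using this
        · have := (ih (PySem.Set.union occ (pvAbs o row col))).mp hfits
          exact (pvSat_congr width height so rest _ _
            (fun q => by rw [PySem.Set.mem_union])).mp this
      · rintro ⟨o, ho, row, col, hv, hdisj, hsat⟩
        refine ⟨o, ho, pvAbs o row col,
          (pvMem_b_spots width height o _).mpr ⟨row, col, hv, rfl⟩, ?_, ?_⟩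
        · intro q hq
          simpa [PySem.Set.contains_iff] using hdisj q hq
        · refine (ih (PySem.Set.union occ (pvAbs o row col))).mpr ?_
          exact (pvSat_congr width height so rest _ _
            (fun q => by rw [PySem.Set.mem_union])).mpr hsat

lemma pvBacktrackA_spec (width height : Int) (so : List (List (List (Int × Int))))
    (sortedPresents : List Int) :
    ∀ (rest : List Int), (∀ s ∈ rest, s ∈ sortedPresents) →
    ∀ (idx : Int) (g : List (List String)) (O : (Int × Int) → Prop),
    pvGridInv width height g O →
    ((backtrackA (a_valid_positions width height so sortedPresents) rest idx g).1 = true ↔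
        pvSat width height so rest O) ∧
    ((backtrackA (a_valid_positions width height so sortedPresents) rest idx g).1 = false →
        (backtrackA (a_valid_positions width height so sortedPresents) rest idx g).2 = g) := by
  intro rest
  induction rest with
  | nil =>
      intro hsub idx g O hinv
      exact ⟨by simp [backtrackA, pvSat], by simp [backtrackA]⟩
  | cons s rest ih =>
      intro hsub idx g O hinv
      have hsS : s ∈ sortedPresents := hsub s (List.mem_cons_self ..)
      have hsubr : ∀ x ∈ rest, x ∈ sortedPresents :=
        fun x hx => hsub x (List.mem_cons_of_mem _ hx)
      have hvp := pvVp_getD width height so sortedPresents s hsS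
      rw [backtrackA, hvp, ← List.foldl_flatten]
      have hmemL : ∀ t, t ∈ ((PySem.List.pyGetD so s []).map
          (a_positions width height)).flatten ↔ ∃ o ∈ PySem.List.pyGetD so s [],
          t ∈ a_positions width height o := by
        intro t
        rw [List.mem_flatten]
        constructor
        · rintro ⟨pos, hpos, ht⟩
          obtain ⟨o, ho, rfl⟩ := List.mem_map.mp hpos
          exact ⟨o, ho, ht⟩
        · rintro ⟨o, ho, ht⟩
          exact ⟨a_positions width height o, List.mem_map.mpr ⟨o, ho, rfl⟩, ht⟩
      obtain ⟨hmain, hrestore⟩ := pvFoldExit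
        (fun (st : Bool × List (List String)) (t : (List (Int × Int)) × Int × Int) =>
          if st.1 then st
          else if can_place st.2 t.1 t.2.1 t.2.2 then
            let g1 := place_shape st.2 t.1 t.2.1 t.2.2 (PySem.Int.toStr idx)
            let res := backtrackA (a_valid_positions width height so sortedPresents)
              rest (idx + 1) g1
            if res.1 then (true, res.2) else (false, remove_shape res.2 t.1 t.2.1 t.2.2)
          else st) g
        (fun t => pvValid width height t.1 t.2.1 t.2.2 ∧
          (∀ q ∈ pvAbs t.1 t.2.1 t.2.2, ¬ O q) ∧
          pvSat width height so rest (fun q => O q ∨ q ∈ pvAbs t.1 t.2.1 t.2.2))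
        (by intro s' t; simp)
        ((PySem.List.pyGetD so s []).map (a_positions width height)).flatten
        (by
          intro t htL
          obtain ⟨o', ho', ht⟩ := (hmemL t).mp htL
          obtain ⟨row, col, rfl, ⟨hrow0, -⟩, ⟨hcol0, -⟩⟩ :=
            (pvMem_a_positions width height o' t).mp ht
          by_cases hcp : can_place g o' row col
          · obtain ⟨hne, hcellprops⟩ := (pvCan_place_iff hinv.1 o' row col).mp hcp
            have hcellsIn : ∀ q ∈ pvAbs o' row col, pvIn width height q := by
              rintro q hq
              obtain ⟨p, hp, rfl⟩ := List.mem_map.mp hq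
              obtain ⟨a, b, c, d, -⟩ := hcellprops p hp
              exact ⟨a, b, c, d⟩
            have hfree : ∀ q ∈ pvAbs o' row col, pvGget g q.1 q.2 = "." := by
              rintro q hq
              obtain ⟨p, hp, rfl⟩ := List.mem_map.mp hq
              exact (hcellprops p hp).2.2.2.2
            have hdisj : ∀ q ∈ pvAbs o' row col, ¬ O q :=
              fun q hq => (hinv.2 q (hcellsIn q hq)).mp (hfree q hq)
            have hinv1 := pvPlace_inv hinv (pvToStr_ne_dot idx) hcellsIn
            obtain ⟨ih1, ih2⟩ := ih hsubr (idx + 1)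
              (place_shape g o' row col (PySem.Int.toStr idx)) _ hinv1
            by_cases hres : (backtrackA (a_valid_positions width height so sortedPresents)
                rest (idx + 1) (place_shape g o' row col (PySem.Int.toStr idx))).1 = true
            · refine Or.inr ⟨?_, ?_⟩
              · simp [hcp, hres]
              · refine ⟨⟨hne, hrow0, hcol0, ?_⟩, hdisj, ih1.mp hres⟩
                intro p hp
                obtain ⟨a, b, c, d, -⟩ := hcellprops p hp
                exact ⟨a, b, c, d⟩
            · refine Or.inl ⟨?_, ?_⟩
              · have hresf : (backtrackA (a_valid_positions width height so sortedPresents)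
                    rest (idx + 1) (place_shape g o' row col (PySem.Int.toStr idx))).1 =
                    false := by
                  cases h : (backtrackA (a_valid_positions width height so sortedPresents)
                      rest (idx + 1) (place_shape g o' row col (PySem.Int.toStr idx))).1
                  · rfl
                  · exact absurd h hres
                have hr2 := ih2 hresf
                simp [hcp, hresf, hr2]
                exact pvPlace_remove hinv.1 (PySem.Int.toStr idx) hcellsIn hfree
              · rintro ⟨-, -, hsat⟩
                exact hres (ih1.mpr hsat)
          · refine Or.inl ⟨by simp [hcp], ?_⟩
            rintro ⟨hv, hdisj, -⟩
            apply hcp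
            refine (pvCan_place_iff hinv.1 o' row col).mpr ⟨hv.1, ?_⟩
            intro p hp
            obtain ⟨a, b, c, d⟩ := hv.2.2.2 p hp
            have hqin : pvIn width height (row + p.1, col + p.2) := ⟨a, b, c, d⟩
            have hmem : (row + p.1, col + p.2) ∈ pvAbs o' row col :=
              List.mem_map.mpr ⟨p, hp, rfl⟩
            exact ⟨a, b, c, d, (hinv.2 _ hqin).mpr (hdisj _ hmem)⟩)
      refine ⟨hmain.trans ?_, hrestore⟩
      simp only [pvSat]
      constructor
      · rintro ⟨t, htL, hP⟩
        obtain ⟨o', ho', ht⟩ := (hmemL t).mp htL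
        obtain ⟨row, col, rfl, -, -⟩ := (pvMem_a_positions width height o' t).mp ht
        exact ⟨o', ho', row, col, hP⟩
      · rintro ⟨o, ho, row, col, hv, hdisj, hsat⟩
        refine ⟨(o, row, col), (hmemL _).mpr ⟨o, ho, ?_⟩, hv, hdisj, hsat⟩
        cases o with
        | nil => exact absurd rfl hv.1
        | cons c0 rest' =>
            obtain ⟨-, hrow0, hcol0, hcell⟩ := hv
            obtain ⟨a0, b0, c0', d0⟩ := hcell c0 (List.mem_cons_self ..)
            have hh : 1 ≤ height := by omega
            have hw : 1 ≤ width := by omega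
            refine (pvMem_a_positions width height _ _).mpr ⟨row, col, rfl, ⟨hrow0, ?_⟩,
              ⟨hcol0, ?_⟩⟩
            · show row < height - rest'.foldl (fun m p => max m p.1) c0.1
              have hb : ∀ p ∈ rest', p.1 < height - row := by
                intro p hp
                obtain ⟨x, y, -, -⟩ := hcell p (List.mem_cons_of_mem _ hp)
                omega
              have := (pvFoldMaxLt rest' (fun p => p.1) c0.1 (height - row)).mpr
                ⟨by omega, hb⟩
              omega
            · show col < width - rest'.foldl (fun m p => max m p.2) c0.2
              have hb : ∀ p ∈ rest', p.2 < width - col := by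
                intro p hp
                obtain ⟨-, -, x, y⟩ := hcell p (List.mem_cons_of_mem _ hp)
                omega
              have := (pvFoldMaxLt rest' (fun p => p.2) c0.2 (width - col)).mpr
                ⟨by omega, hb⟩
              omega

-- ===== VERDICT (by name: the statement is the Claim_ definition above) =====
lemma pvInv0 (width height : Int) :
    pvGridInv width height
      (List.replicate height.toNat (List.replicate width.toNat "."))
      (fun _ => False) := by
  refine ⟨⟨by simp, by intro r hr; simp [List.eq_of_mem_replicate hr]⟩, ?_⟩
  rintro ⟨a, b⟩ ⟨h1, h2, h3, h4⟩
  simp only at h1 h2 h3 h4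
  have ha : a.toNat < height.toNat := by omega
  have hb : b.toNat < width.toNat := by omega
  unfold pvGget
  rw [PySem.List.pyGetD_of_nonneg _ _ h1,
    List.getD_eq_getElem _ _ (by simpa using ha), List.getElem_replicate,
    PySem.List.pyGetD_of_nonneg _ _ h3,
    List.getD_eq_getElem _ _ (by simpa using hb), List.getElem_replicate]
  simp

theorem try_fit_presents_spec : Claim_equal_try_fit_presents := by
  intro width height presents_list so _ _
  unfold Spec_try_fit_presents try_fit_presents try_fit_presents_alt
  have hpws : presents_list.foldl (fun acc s =>
      acc ++ [(((PySem.List.pyGetD (PySem.List.pyGetD so s []) 0 []).length : Int), s)])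
      ([] : List (Int × Int)) = presents_list.map (fun s =>
      (((PySem.List.pyGetD (PySem.List.pyGetD so s []) 0 []).length : Int), s)) := by
    rw [PySem.List.foldl_append_singleton_eq_map, List.nil_append]
  simp only [hpws]
  set sp := (PySem.List.sorted2 (presents_list.map (fun s =>
      (((PySem.List.pyGetD (PySem.List.pyGetD so s []) 0 []).length : Int), s)))
      (fun p => p.1) (fun p => p.2) true).map (fun p => p.2) with hsp
  have hA := (pvBacktrackA_spec width height so sp sp (fun x hx => hx) 0
    (List.replicate height.toNat (List.replicate width.toNat "."))
    (fun _ => False) (pvInv0 width height)).1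
  have hperm : sp.Perm presents_list := by
    have h1 := (PySem.List.sorted2_perm (presents_list.map (fun s =>
      (((PySem.List.pyGetD (PySem.List.pyGetD so s []) 0 []).length : Int), s)))
      (fun p => p.1) (fun p => p.2) true).map (fun p : Int × Int => p.2)
    rw [hsp]
    simpa [List.map_map, Function.comp_def] using h1
  have hB := pvB_fits_iff width height so presents_list PySem.Set.empty
  have hBF := pvSat_congr width height so presents_list
    (· ∈ PySem.Set.empty) (fun _ => False) (by intro q; simp [PySem.Set.empty])
  have hP := pvSat_perm width height so hperm (fun _ => False)
  exact Bool.coe_iff_coe.mp (hA.trans (hP.trans (hBF.symm.trans hB.symm)))
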